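-- pv_equiv track=rewrite | github.com/salvac12/alter5-bi | scripts/verify_domain_redirects.py | deduplicate_contacts
-- ===== SOURCE A (Python) =====
-- from typing import Any, TypedDict
--
-- def deduplicate_contacts(
--     contacts_a: list[dict[str, Any]],
--     contacts_b: list[dict[str, Any]],
-- ) -> list[dict[str, Any]]:
--     """Merge two contact lists, dedup by email, keep richest role info."""
--     by_email: dict[str, dict[str, Any]] = {}
--     for c in contacts_a + contacts_b:
--         email = (c.get("email") or "").lower().strip()
--         if not email:
--             continue
--         existing = by_email.get(email)
--         if existing is None:
--             by_email[email] = dict(c)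
--         else:
--             # Keep the one with a better role
--             existing_role = (existing.get("role") or "").strip()
--             new_role = (c.get("role") or "").strip()
--             if (not existing_role or existing_role == "No identificado" or existing_role == "nan") \
--                     and new_role and new_role != "No identificado" and new_role != "nan":
--                 by_email[email] = dict(c)
--             # Keep nombre/apellido if missing
--             if not existing.get("nombre") and c.get("nombre"):
--                 by_email[email]["nombre"] = c["nombre"]
--             if not existing.get("apellido") and c.get("apellido"):
--                 by_email[email]["apellido"] = c["apellido"]
--     return list(by_email.values())
-- ===== SOURCE B (Python) =====
-- def _norm_email(contact):
--     return (contact.get("email") or "").lower().strip()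
--
--
-- def _has_real_role(contact_dict):
--     role = (contact_dict.get("role") or "").strip()
--     return role != "" and role != "No identificado" and role != "nan"
--
--
-- def _merge_pair(acc, contact):
--     merged = dict(contact) if _has_real_role(contact) and not _has_real_role(acc) else acc
--     for field in ("nombre", "apellido"):
--         if not merged.get(field) and contact.get(field):
--             merged[field] = contact[field]
--     return merged
--
--
-- def deduplicate_contacts(contacts_a, contacts_b):
--     """Merge two contact lists, dedup by email, keep richest role info."""
--     groups = {}
--     for contact in contacts_a + contacts_b:
--         email = _norm_email(contact)
--         if email:
--             groups.setdefault(email, []).append(contact)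
--     merged = []
--     for bucket in groups.values():
--         acc = dict(bucket[0])
--         for contact in bucket[1:]:
--             acc = _merge_pair(acc, contact)
--         merged.append(acc)
--     return merged
-- ===== Notes on version B (the rewrite author's own statement) =====
-- stated objective: alternative
-- what changed: Replaces the single-pass merged-contacts dict with a two-phase decomposition: group contacts into buckets by normalized email, then fold each bucket with a natural pairwise merge (role upgrade, then fill nombre/apellido from the current accumulator via a field loop).
import Mathlib
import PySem

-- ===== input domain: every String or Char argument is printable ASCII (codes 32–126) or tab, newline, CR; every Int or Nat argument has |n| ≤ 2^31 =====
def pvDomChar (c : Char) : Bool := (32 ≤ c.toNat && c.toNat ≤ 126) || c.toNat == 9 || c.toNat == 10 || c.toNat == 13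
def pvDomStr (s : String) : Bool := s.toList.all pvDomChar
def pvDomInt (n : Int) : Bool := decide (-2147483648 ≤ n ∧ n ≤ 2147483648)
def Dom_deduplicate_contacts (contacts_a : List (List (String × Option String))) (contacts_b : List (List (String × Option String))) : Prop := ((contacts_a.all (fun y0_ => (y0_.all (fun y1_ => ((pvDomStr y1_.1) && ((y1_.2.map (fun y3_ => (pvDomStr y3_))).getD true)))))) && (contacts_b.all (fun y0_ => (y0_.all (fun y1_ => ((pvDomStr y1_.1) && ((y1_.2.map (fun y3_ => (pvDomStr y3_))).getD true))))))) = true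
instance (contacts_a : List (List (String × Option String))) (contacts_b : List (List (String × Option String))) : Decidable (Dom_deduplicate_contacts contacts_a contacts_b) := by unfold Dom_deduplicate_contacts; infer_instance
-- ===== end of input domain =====

-- B replaces A's single-pass merged-contacts dict with a two-phase decomposition (bucket the
-- contacts by normalized email, then fold each bucket pairwise); same cost, return value proved equal.

-- ===== PORT A =====
-- `(x or "")` for x : Optional[str] (missing key / None / "" all give "")
def pvOrEmpty (o : Option (Option String)) : String :=
  match o with
  | some (some s) => s
  | _ => ""

-- truthiness of `c.get(k)` for an Optional[str] value
def pvTruthy (o : Option (Option String)) : Bool := pvOrEmpty o ≠ ""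

-- `(c.get("email") or "").lower().strip()`
def pvEmail (cd : PySem.Dict String (Option String)) : String :=
  PySem.Str.strip (PySem.Str.lower (pvOrEmpty (cd.get? "email")))

-- `not r or r == "No identificado" or r == "nan"` on an already-stripped role r
def pvBadRole (r : String) : Bool := r = "" || r = "No identificado" || r = "nan"

-- one iteration of A's loop over `contacts_a + contacts_b`, state = by_email
def pvStepA (d : PySem.Dict String (PySem.Dict String (Option String)))
    (c : List (String × Option String)) : PySem.Dict String (PySem.Dict String (Option String)) :=
  let cd := PySem.Dict.ofList c
  let email := pvEmail cd
  if email = "" then d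
  else
    match d.get? email with
    | none => d.insert email cd                      -- by_email[email] = dict(c)
    | some existing =>
        let existingRole := PySem.Str.strip (pvOrEmpty (existing.get? "role"))
        let newRole := PySem.Str.strip (pvOrEmpty (cd.get? "role"))
        let d1 := if (pvBadRole existingRole && !pvBadRole newRole) = true
                  then d.insert email cd else d      -- by_email[email] = dict(c)
        let d2 := if (!pvTruthy (existing.get? "nombre") && pvTruthy (cd.get? "nombre")) = true
                  then d1.modify email PySem.Dict.empty (fun m => m.insert "nombre" ((cd.get? "nombre").getD none))
                  else d1                            -- by_email[email]["nombre"] = c["nombre"]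
        let d3 := if (!pvTruthy (existing.get? "apellido") && pvTruthy (cd.get? "apellido")) = true
                  then d2.modify email PySem.Dict.empty (fun m => m.insert "apellido" ((cd.get? "apellido").getD none))
                  else d2                            -- by_email[email]["apellido"] = c["apellido"]
        d3

def deduplicate_contacts (contacts_a : List (List (String × Option String))) (contacts_b : List (List (String × Option String))) : List (List (String × Option String)) :=
  (((contacts_a ++ contacts_b).foldl pvStepA PySem.Dict.empty).values).map (fun m => m.items)

-- ===== PORT B =====
-- _norm_email(contact)
def bNormEmail (contact : PySem.Dict String (Option String)) : String :=
  PySem.Str.strip (PySem.Str.lower (((contact.get? "email").getD none).getD ""))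

-- _has_real_role(contact_dict)
def bRealRole (contact : PySem.Dict String (Option String)) : Bool :=
  let role := PySem.Str.strip (((contact.get? "role").getD none).getD "")
  !(role == "") && !(role == "No identificado") && !(role == "nan")

-- body of the `for field in ("nombre", "apellido")` loop inside _merge_pair
def bFill (contact : PySem.Dict String (Option String))
    (m : PySem.Dict String (Option String)) (field : String) : PySem.Dict String (Option String) :=
  if (((m.get? field).getD none).getD "" == "") && !(((contact.get? field).getD none).getD "" == "")
  then m.insert field ((contact.get? field).getD none)
  else m

-- _merge_pair(acc, contact)
def bMergePair (acc contact : PySem.Dict String (Option String)) : PySem.Dict String (Option String) :=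
  (["nombre", "apellido"]).foldl (bFill contact)
    (if bRealRole contact && !bRealRole acc then contact else acc)

-- inner bucket loop: `acc = dict(bucket[0]); for contact in bucket[1:]: acc = _merge_pair(acc, contact)`
def bMergeBucket (bucket : List (PySem.Dict String (Option String))) : PySem.Dict String (Option String) :=
  match bucket with
  | [] => PySem.Dict.empty            -- buckets are never empty
  | first :: rest => rest.foldl bMergePair first

-- grouping-pass body: `groups.setdefault(email, []).append(contact)`
def bGroupStep (groups : PySem.Dict String (List (PySem.Dict String (Option String))))
    (contact : List (String × Option String)) : PySem.Dict String (List (PySem.Dict String (Option String))) :=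
  let cd := PySem.Dict.ofList contact
  let email := bNormEmail cd
  if email == "" then groups else groups.modify email [] (fun bucket => bucket ++ [cd])

def deduplicate_contacts_alt (contacts_a : List (List (String × Option String))) (contacts_b : List (List (String × Option String))) : List (List (String × Option String)) :=
  let groups := (contacts_a ++ contacts_b).foldl bGroupStep PySem.Dict.empty
  groups.values.map (fun bucket => (bMergeBucket bucket).items)

-- ===== PRECONDITION & SPEC =====
def Spec_deduplicate_contacts (contacts_a : List (List (String × Option String))) (contacts_b : List (List (String × Option String))) (out : List (List (String × Option String))) : Prop := out = deduplicate_contacts_alt contacts_a contacts_b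
instance (contacts_a : List (List (String × Option String))) (contacts_b : List (List (String × Option String))) (out : List (List (String × Option String))) : Decidable (Spec_deduplicate_contacts contacts_a contacts_b out) := by unfold Spec_deduplicate_contacts; infer_instance

-- ===== CLAIM (what is proved, stated in full; the proofs are below) =====
def Claim_equal_deduplicate_contacts : Prop := ∀ (contacts_a : List (List (String × Option String))) (contacts_b : List (List (String × Option String))), Dom_deduplicate_contacts contacts_a contacts_b → Spec_deduplicate_contacts contacts_a contacts_b (deduplicate_contacts contacts_a contacts_b)

-- ===== LEMMAS AND PROOFS =====

-- bridge: B's `(o or "")` spelling equals A's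
theorem pvOrEmpty_eq (o : Option (Option String)) : ((o.getD none).getD "") = pvOrEmpty o := by
  rcases o with _ | (_ | s) <;> rfl

theorem bNormEmail_eq (d : PySem.Dict String (Option String)) : bNormEmail d = pvEmail d := by
  simp [bNormEmail, pvEmail, pvOrEmpty_eq]

theorem bRealRole_eq (d : PySem.Dict String (Option String)) :
    bRealRole d = !pvBadRole (PySem.Str.strip (pvOrEmpty (d.get? "role"))) := by
  simp only [bRealRole, pvBadRole, pvOrEmpty_eq, Bool.not_or]
  by_cases h1 : PySem.Str.strip (pvOrEmpty (d.get? "role")) = "" <;>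
  by_cases h2 : PySem.Str.strip (pvOrEmpty (d.get? "role")) = "No identificado" <;>
  by_cases h3 : PySem.Str.strip (pvOrEmpty (d.get? "role")) = "nan" <;>
    simp [h1, h2, h3]

theorem bEmptyCond_eq (o : Option (Option String)) :
    (((o.getD none).getD "" : String) == "") = !pvTruthy o := by
  rw [pvOrEmpty_eq]
  by_cases h : pvOrEmpty o = "" <;> simp [pvTruthy, h]

-- insert of the value a key already holds is the identity (unique keys)
theorem pvInsert_self_of_get {ν : Type} (D : PySem.Dict String ν)
    (e : String) (x : ν) (hnd : D.keys.Nodup) (h : D.get? e = some x) : D.insert e x = D := by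
  apply PySem.Dict.ext
  have hc : D.contains e = true := by rw [PySem.Dict.contains_eq_isSome_get?, h]; rfl
  rw [PySem.Dict.items_insert_of_contains _ _ hc]
  conv_rhs => rw [← List.map_id D.items]
  apply List.map_congr_left
  intro p hp
  obtain ⟨p1, p2⟩ := p
  by_cases hpe : (p1 == e) = true
  · have hpe' : p1 = e := by simpa using hpe
    subst hpe'
    have h2 : D.get? p1 = some p2 := PySem.Dict.get?_of_mem_items D hp hnd
    rw [h] at h2
    simp_all
  · simp [hpe]

-- B's fill step is a no-op when the accumulator IS the contact
theorem bFill_self (cd : PySem.Dict String (Option String)) (f : String) : bFill cd cd f = cd := by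
  unfold bFill
  by_cases h : (((cd.get? f).getD none).getD "" : String) == "" <;> simp [h]

-- B's fill step as A spells its condition
theorem bFill_eq (cd m : PySem.Dict String (Option String)) (f : String) :
    bFill cd m f = if (!pvTruthy (m.get? f) && pvTruthy (cd.get? f)) = true
                   then m.insert f ((cd.get? f).getD none) else m := by
  unfold bFill
  rw [bEmptyCond_eq, bEmptyCond_eq, Bool.not_not]

-- A's loop body, when the email is already present, is one overwrite with B's pairwise merge
theorem pvStepA_some (D : PySem.Dict String (PySem.Dict String (Option String)))
    (c : List (String × Option String)) (ex : PySem.Dict String (Option String))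
    (hnd : D.keys.Nodup)
    (he : ¬ pvEmail (PySem.Dict.ofList c) = "")
    (hg : D.get? (pvEmail (PySem.Dict.ofList c)) = some ex) :
    pvStepA D c = D.insert (pvEmail (PySem.Dict.ofList c)) (bMergePair ex (PySem.Dict.ofList c)) := by
  have hgD : D.getD (pvEmail (PySem.Dict.ofList c)) PySem.Dict.empty = ex := by
    simp [PySem.Dict.getD, hg]
  have hrepl : (bRealRole (PySem.Dict.ofList c) && !bRealRole ex) =
      (pvBadRole (PySem.Str.strip (pvOrEmpty (ex.get? "role"))) &&
       !pvBadRole (PySem.Str.strip (pvOrEmpty ((PySem.Dict.ofList c).get? "role")))) := by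
    rw [bRealRole_eq, bRealRole_eq, Bool.not_not, Bool.and_comm]
  simp only [pvStepA, he, if_false, hg]
  by_cases hr : (pvBadRole (PySem.Str.strip (pvOrEmpty (ex.get? "role"))) &&
      !pvBadRole (PySem.Str.strip (pvOrEmpty ((PySem.Dict.ofList c).get? "role")))) = true
  · -- role replacement: A overwrites with the contact, its fills are self-inserts (no-ops);
    -- B's fill conditions on merged = contact are contradictory, so both sides give the contact
    have hnodcd : (PySem.Dict.ofList c).keys.Nodup := PySem.Dict.nodup_keys_ofList c
    have hins : ∀ f : String, pvTruthy ((PySem.Dict.ofList c).get? f) = true →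
        (PySem.Dict.ofList c).insert f (((PySem.Dict.ofList c).get? f).getD none) =
          PySem.Dict.ofList c := by
      intro f hT
      rcases h : (PySem.Dict.ofList c).get? f with _ | v
      · rw [h] at hT; simp [pvTruthy, pvOrEmpty] at hT
      · exact pvInsert_self_of_get _ f v hnodcd (by rw [h])
    have hB : bMergePair ex (PySem.Dict.ofList c) = PySem.Dict.ofList c := by
      unfold bMergePair
      rw [hrepl, if_pos hr]
      simp only [List.foldl_cons, List.foldl_nil, bFill_self]
    rw [hB, if_pos hr]
    simp only [PySem.Dict.modify]
    split_ifs with h2 h3 h3 <;>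
      (try simp only [PySem.Dict.getD_insert_self]) <;>
      (try rw [hins "nombre" (by simp_all)]) <;>
      (try rw [hins "apellido" (by simp_all)]) <;>
      simp only [PySem.Dict.insert_insert_self]
  · -- no replacement: A's two conditional fills equal B's two-field fold on merged = ex
    have hB : bMergePair ex (PySem.Dict.ofList c) =
        bFill (PySem.Dict.ofList c) (bFill (PySem.Dict.ofList c) ex "nombre") "apellido" := by
      unfold bMergePair
      rw [hrepl, if_neg hr]
      rfl
    rw [hB]
    simp only [bFill_eq]
    have hga : (if (!pvTruthy (ex.get? "nombre") && pvTruthy ((PySem.Dict.ofList c).get? "nombre")) = true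
        then ex.insert "nombre" (((PySem.Dict.ofList c).get? "nombre").getD none)
        else ex).get? "apellido" = ex.get? "apellido" := by
      split_ifs
      · exact PySem.Dict.get?_insert_of_ne _ _ (by decide)
      · rfl
    rw [hga, if_neg hr]
    simp only [PySem.Dict.modify]
    split_ifs with h2 h3 h3 <;>
      (try simp only [hgD, PySem.Dict.getD_insert_self, PySem.Dict.insert_insert_self]) <;>
      first
        | rfl
        | exact (pvInsert_self_of_get D _ ex hnd hg).symm

-- B's groups dict with every bucket folded: the bridge between the two loop states
def pvMapVals (g : PySem.Dict String (List (PySem.Dict String (Option String)))) :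
    PySem.Dict String (PySem.Dict String (Option String)) :=
  PySem.Dict.mk (g.items.map (fun p => (p.1, bMergeBucket p.2)))

theorem pvGet?_mapVals (g : PySem.Dict String (List (PySem.Dict String (Option String)))) (e : String) :
    (pvMapVals g).get? e = (g.get? e).map bMergeBucket := by
  obtain ⟨items⟩ := g
  induction items with
  | nil => simp [pvMapVals, PySem.Dict.get?]
  | cons p t ih =>
      obtain ⟨p1, p2⟩ := p
      show (PySem.Dict.mk ((p1, bMergeBucket p2) :: t.map (fun p => (p.1, bMergeBucket p.2)))).get? e =
        ((PySem.Dict.mk ((p1, p2) :: t)).get? e).map bMergeBucket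
      rw [PySem.Dict.get?_mk_cons, PySem.Dict.get?_mk_cons]
      cases h : (p1 == e)
      · simpa [h, pvMapVals] using ih
      · simp

theorem pvKeys_mapVals (g : PySem.Dict String (List (PySem.Dict String (Option String)))) :
    (pvMapVals g).keys = g.keys := by
  simp [pvMapVals, PySem.Dict.keys]

theorem pvContains_mapVals (g : PySem.Dict String (List (PySem.Dict String (Option String)))) (e : String) :
    (pvMapVals g).contains e = g.contains e := by
  rw [PySem.Dict.contains_eq_isSome_get?, PySem.Dict.contains_eq_isSome_get?, pvGet?_mapVals]
  cases g.get? e <;> rfl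

theorem pvInsert_mapVals (g : PySem.Dict String (List (PySem.Dict String (Option String))))
    (e : String) (v : List (PySem.Dict String (Option String))) :
    pvMapVals (g.insert e v) = (pvMapVals g).insert e (bMergeBucket v) := by
  apply PySem.Dict.ext
  show (g.insert e v).items.map _ = _
  by_cases h : g.contains e = true
  · rw [PySem.Dict.items_insert_of_contains _ _ h,
        PySem.Dict.items_insert_of_contains _ _ (by rw [pvContains_mapVals]; exact h)]
    show _ = (g.items.map _).map _
    rw [List.map_map, List.map_map]
    apply List.map_congr_left
    intro p _
    by_cases hp : p.1 = e <;> simp [hp]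
  · have hf : g.contains e = false := eq_false_of_ne_true h
    have h' : (pvMapVals g).contains e = false := by rw [pvContains_mapVals]; exact hf
    rw [PySem.Dict.items_insert_of_not_contains _ _ hf,
        PySem.Dict.items_insert_of_not_contains _ _ h']
    simp [pvMapVals]

set_option maxHeartbeats 1000000 in
theorem pvStep_commute (g : PySem.Dict String (List (PySem.Dict String (Option String))))
    (hnd : g.keys.Nodup) (hne : ∀ p ∈ g.items, p.2 ≠ [])
    (c : List (String × Option String)) :
    pvStepA (pvMapVals g) c = pvMapVals (bGroupStep g c) := by
  by_cases he : pvEmail (PySem.Dict.ofList c) = ""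
  · simp [pvStepA, bGroupStep, bNormEmail_eq, he]
  · have hndD : (pvMapVals g).keys.Nodup := by rw [pvKeys_mapVals]; exact hnd
    cases hg : g.get? (pvEmail (PySem.Dict.ofList c)) with
    | none =>
        have : (pvMapVals g).get? (pvEmail (PySem.Dict.ofList c)) = none := by
          rw [pvGet?_mapVals, hg]; rfl
        have hgD : g.getD (pvEmail (PySem.Dict.ofList c)) [] = [] := by
          simp [PySem.Dict.getD, hg]
        simp only [pvStepA, bGroupStep, bNormEmail_eq, he, if_false, beq_iff_eq, this,
          PySem.Dict.modify, hgD, pvInsert_mapVals]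
        rfl
    | some gs =>
        have hgs : gs ≠ [] := hne _ (PySem.Dict.mem_items_of_get?_eq_some (d := g) hg)
        obtain ⟨x, r, rfl⟩ : ∃ x r, gs = x :: r := by
          cases gs with
          | nil => exact absurd rfl hgs
          | cons x r => exact ⟨x, r, rfl⟩
        have hD : (pvMapVals g).get? (pvEmail (PySem.Dict.ofList c)) = some (bMergeBucket (x :: r)) := by
          rw [pvGet?_mapVals, hg]; rfl
        rw [pvStepA_some (pvMapVals g) c _ hndD he hD]
        have hgD : g.getD (pvEmail (PySem.Dict.ofList c)) [] = x :: r := by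
          simp [PySem.Dict.getD, hg]
        simp only [bGroupStep, bNormEmail_eq, he, if_false, beq_iff_eq,
          PySem.Dict.modify, hgD, pvInsert_mapVals]
        have hfold : bMergePair (bMergeBucket (x :: r)) (PySem.Dict.ofList c) =
            bMergeBucket ((x :: r) ++ [PySem.Dict.ofList c]) := by
          simp [bMergeBucket, List.foldl_append]
        rw [hfold]

theorem bGroupStep_nodup (g : PySem.Dict String (List (PySem.Dict String (Option String))))
    (c : List (String × Option String)) (hnd : g.keys.Nodup) : (bGroupStep g c).keys.Nodup := by
  by_cases he : bNormEmail (PySem.Dict.ofList c) = ""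
  · simpa [bGroupStep, he] using hnd
  · simp only [bGroupStep, beq_iff_eq, he, if_false]
    exact PySem.Dict.nodup_keys_insert _ _ _ hnd

theorem bGroupStep_ne (g : PySem.Dict String (List (PySem.Dict String (Option String))))
    (c : List (String × Option String)) (hne : ∀ p ∈ g.items, p.2 ≠ []) :
    ∀ p ∈ (bGroupStep g c).items, p.2 ≠ [] := by
  by_cases he : bNormEmail (PySem.Dict.ofList c) = ""
  · simpa [bGroupStep, he] using hne
  · simp only [bGroupStep, beq_iff_eq, he, if_false]
    intro p hp
    rw [show (g.modify (bNormEmail (PySem.Dict.ofList c)) [] (· ++ [PySem.Dict.ofList c])) =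
        g.insert (bNormEmail (PySem.Dict.ofList c))
          ((g.getD (bNormEmail (PySem.Dict.ofList c)) []) ++ [PySem.Dict.ofList c]) from rfl,
      PySem.Dict.mem_items_insert] at hp
    rcases hp with rfl | ⟨hp, _⟩
    · simp
    · exact hne _ hp

theorem pvFold_commute (l : List (List (String × Option String))) :
    ∀ g, g.keys.Nodup → (∀ p ∈ g.items, p.2 ≠ []) →
      l.foldl pvStepA (pvMapVals g) = pvMapVals (l.foldl bGroupStep g) := by
  induction l with
  | nil => intro g _ _; rfl
  | cons c t ih =>
      intro g hnd hne
      simp only [List.foldl_cons, pvStep_commute g hnd hne c]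
      exact ih _ (bGroupStep_nodup g c hnd) (bGroupStep_ne g c hne)

-- ===== VERDICT (by name: the statement is the Claim_ definition above) =====
theorem deduplicate_contacts_spec : Claim_equal_deduplicate_contacts := by
  intro a b _
  unfold Spec_deduplicate_contacts deduplicate_contacts deduplicate_contacts_alt
  have h0 : (PySem.Dict.empty : PySem.Dict String (PySem.Dict String (Option String))) =
      pvMapVals PySem.Dict.empty := rfl
  rw [h0, pvFold_commute (a ++ b) PySem.Dict.empty PySem.Dict.nodup_keys_empty (by intro p hp; cases hp)]
  simp [pvMapVals, PySem.Dict.values, List.map_map]
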